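-- pv_equiv track=rewrite | github.com/Fivebulldogs/aoc | 2024/day21/part1.py | get_strings_from_directions
-- ===== SOURCE A (Python) =====
-- def get_strings_from_directions(directions):
--     direction_strings = [""]
--     for direction_variants in directions:
--         new_direction_strings = []
--         for dir_variant in direction_variants:
--             for dir_str in direction_strings:
--                 new_direction_strings.append(f"{dir_str}{dir_variant}")
--         direction_strings = new_direction_strings
--     return direction_strings
-- ===== SOURCE B (Python) =====
-- def get_strings_from_directions(directions):
--     # Mixed-radix enumeration: the k-th output string is obtained by decoding k
--     # with the group sizes as digits (first group = fastest-varying digit),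
--     # instead of growing an accumulator list group by group.
--     total = 1
--     for group in directions:
--         total *= len(group)
--     result = []
--     for k in range(total):
--         s = ""
--         q = k
--         for group in directions:
--             s += group[q % len(group)]
--             q //= len(group)
--         result.append(s)
--     return result
-- ===== Notes on version B (the rewrite author's own statement) =====
-- stated objective: alternative
-- what changed: B computes the product of the group sizes and builds the k-th output string directly by mixed-radix decoding of k (first group = fastest digit), instead of A's incremental accumulator list rebuilt group by group.
import Mathlib
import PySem

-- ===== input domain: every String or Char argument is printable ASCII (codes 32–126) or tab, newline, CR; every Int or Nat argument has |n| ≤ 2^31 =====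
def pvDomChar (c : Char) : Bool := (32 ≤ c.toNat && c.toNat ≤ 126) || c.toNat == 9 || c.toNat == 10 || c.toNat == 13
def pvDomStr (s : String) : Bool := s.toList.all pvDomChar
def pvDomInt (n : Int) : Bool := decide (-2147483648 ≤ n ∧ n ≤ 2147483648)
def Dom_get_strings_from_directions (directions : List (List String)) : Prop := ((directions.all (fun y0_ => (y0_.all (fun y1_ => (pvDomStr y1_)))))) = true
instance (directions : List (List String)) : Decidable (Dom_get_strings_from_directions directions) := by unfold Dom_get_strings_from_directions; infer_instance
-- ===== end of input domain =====

-- B enumerates the k-th output directly by mixed-radix decoding of k (group sizes as digits)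
-- instead of A's group-by-group accumulator list; alternative algorithm, same cost.

-- ===== PORT A =====
def get_strings_from_directions (directions : List (List String)) : List String :=
  directions.foldl
    (fun direction_strings direction_variants =>
      direction_variants.foldl
        (fun new_direction_strings dir_variant =>
          direction_strings.foldl
            (fun acc dir_str => acc ++ [dir_str ++ dir_variant])
            new_direction_strings)
        [])
    [""]

-- ===== PORT B =====
-- `group[q % len(group)]`: the index is always in range when the k-loop runs (every group is
-- then nonempty, since total > 0), so pyGetD's "" default is only a totality guard.
def get_strings_from_directions_alt (directions : List (List String)) : List String :=
  let total : Int := directions.foldl (fun t group => t * (group.length : Int)) 1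
  (PySem.List.pyRange 0 total 1).foldl
    (fun result k =>
      let sq : String × Int :=
        directions.foldl
          (fun (p : String × Int) group =>
            (p.1 ++ PySem.List.pyGetD group (PySem.Int.mod p.2 (group.length : Int)) "",
             PySem.Int.floordiv p.2 (group.length : Int)))
          ("", k)
      result ++ [sq.1])
    []

-- ===== PRECONDITION & SPEC =====
def Spec_get_strings_from_directions (directions : List (List String)) (out : List String) : Prop := out = get_strings_from_directions_alt directions
instance (directions : List (List String)) (out : List String) : Decidable (Spec_get_strings_from_directions directions out) := by unfold Spec_get_strings_from_directions; infer_instance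

-- ===== CLAIM (what is proved, stated in full; the proofs are below) =====
def Claim_equal_get_strings_from_directions : Prop := ∀ (directions : List (List String)), Dom_get_strings_from_directions directions → Spec_get_strings_from_directions directions (get_strings_from_directions directions)

-- ===== LEMMAS AND PROOFS =====

-- Intermediate canonical form: the product list built as suffixes, right to left.
def pvProdList (G : List (List String)) : List String :=
  G.reverse.foldl
    (fun suffixes group => suffixes.flatMap (fun s => group.map (fun v => v ++ s)))
    [""]

-- Mixed-radix decoder (Nat version of B's inner loop) and the size product.
def pvDec : List (List String) → Nat → String
  | [], _ => ""
  | g :: G, q => g.getD (q % g.length) "" ++ pvDec G (q / g.length)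

def pvProdN (G : List (List String)) : Nat := (G.map List.length).prod

-- A's one-group step is a flatMap of maps.
theorem pv_stepA_eq_flatMap (ds : List String) :
    ∀ (g nds : List String),
      g.foldl (fun nds v => ds.foldl (fun acc p => acc ++ [p ++ v]) nds) nds
        = nds ++ g.flatMap (fun v => ds.map (fun p => p ++ v)) := by
  intro g
  induction g with
  | nil => intro nds; simp
  | cons v g ih =>
      intro nds
      rw [List.foldl_cons, ih, PySem.List.foldl_append_singleton_eq_map]
      simp

-- A's left-to-right accumulator starting from ds equals the product of ds with pvProdList.
theorem pv_main_lemma (G : List (List String)) :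
    ∀ ds : List String,
      G.foldl
        (fun direction_strings direction_variants =>
          direction_variants.foldl
            (fun nds v => direction_strings.foldl (fun acc p => acc ++ [p ++ v]) nds)
            [])
        ds
      = (pvProdList G).flatMap (fun s => ds.map (fun p => p ++ s)) := by
  induction G with
  | nil =>
      intro ds
      simp [pvProdList]
  | cons g G ih =>
      intro ds
      have hB : pvProdList (g :: G)
          = (pvProdList G).flatMap (fun s => g.map (fun v => v ++ s)) := by
        simp [pvProdList]
      rw [List.foldl_cons, pv_stepA_eq_flatMap, ih, hB, List.nil_append]
      simp only [List.flatMap_assoc, List.map_flatMap, List.map_map, Function.comp_def,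
        String.append_assoc]
      congr 1
      funext s
      rw [List.flatMap_map]

-- B's running Int product equals the Nat product of the lengths.
theorem pv_total_eq (G : List (List String)) :
    ∀ t : Nat,
      G.foldl (fun t group => t * (group.length : Int)) (t : Int)
        = ((G.foldl (fun t group => t * group.length) t : Nat) : Int) := by
  induction G with
  | nil => intro t; simp
  | cons g G ih =>
      intro t
      simp only [List.foldl_cons]
      rw [show ((t : Int) * (g.length : Int)) = ((t * g.length : Nat) : Int) by push_cast; ring]
      exact ih _

theorem pv_foldl_prodN (G : List (List String)) :
    G.foldl (fun t group => t * group.length) 1 = pvProdN G := by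
  rw [pvProdN, List.prod_eq_foldl, List.foldl_map]

-- B's inner decoding loop computes pvDec.
theorem pv_fold_dec (G : List (List String)) :
    ∀ (s : String) (q : Nat),
      (G.foldl
          (fun (p : String × Int) group =>
            (p.1 ++ PySem.List.pyGetD group (PySem.Int.mod p.2 (group.length : Int)) "",
             PySem.Int.floordiv p.2 (group.length : Int)))
          (s, (q : Nat))).1
        = s ++ pvDec G q := by
  induction G with
  | nil => intro s q; simp [pvDec]
  | cons g G ih =>
      intro s q
      simp only [List.foldl_cons, PySem.Int.mod_natCast, PySem.Int.floordiv_natCast,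
        PySem.List.pyGetD_natCast]
      rw [ih, pvDec, String.append_assoc]

-- range(n*M) decomposes into M blocks of n.
theorem pv_range_mul (n : Nat) :
    ∀ M : Nat,
      List.range (n * M)
        = (List.range M).flatMap (fun j => (List.range n).map (fun i => n * j + i)) := by
  intro M
  induction M with
  | zero => simp
  | succ M ih =>
      rw [Nat.mul_succ, List.range_add, ih, List.range_succ, List.flatMap_append]
      simp

-- Reading a list off by in-range indices is the list itself.
theorem pv_map_range_getD (g : List String) (f : String → String) :
    (List.range g.length).map (fun i => f (g.getD i "")) = g.map f := by
  apply List.ext_getElem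
  · simp
  · intro i h1 h2
    simp only [List.getElem_map, List.getElem_range]
    rw [List.getD_eq_getElem g "" (by simpa using h1)]

-- The suffix-product list is exactly the mixed-radix enumeration.
theorem pv_prodList_eq_dec (G : List (List String)) :
    pvProdList G = (List.range (pvProdN G)).map (pvDec G) := by
  induction G with
  | nil => simp [pvProdList, pvProdN, pvDec]
  | cons g G ih =>
      have hB : pvProdList (g :: G)
          = (pvProdList G).flatMap (fun s => g.map (fun v => v ++ s)) := by
        simp [pvProdList]
      have hN : pvProdN (g :: G) = g.length * pvProdN G := by
        simp [pvProdN]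
      rw [hB, ih, hN, pv_range_mul, List.map_flatMap, List.flatMap_map]
      congr 1
      funext j
      have hblock : ∀ i ∈ List.range g.length,
          pvDec (g :: G) (g.length * j + i) = g.getD i "" ++ pvDec G j := by
        intro i hi
        have hi' : i < g.length := List.mem_range.mp hi
        have hn : 0 < g.length := Nat.lt_of_le_of_lt (Nat.zero_le i) hi'
        rw [pvDec, Nat.mul_add_mod, Nat.mod_eq_of_lt hi', Nat.mul_add_div hn,
          Nat.div_eq_of_lt hi', Nat.add_zero]
      calc g.map (fun v => v ++ pvDec G j)
          = (List.range g.length).map (fun i => g.getD i "" ++ pvDec G j) :=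
            (pv_map_range_getD g (fun v => v ++ pvDec G j)).symm
        _ = ((List.range g.length).map (fun i => g.length * j + i)).map (pvDec (g :: G)) := by
            rw [List.map_map]
            exact (List.map_congr_left hblock).symm

-- B's port equals the mixed-radix enumeration.
theorem pv_alt_eq_dec (G : List (List String)) :
    get_strings_from_directions_alt G = (List.range (pvProdN G)).map (pvDec G) := by
  simp only [get_strings_from_directions_alt]
  rw [show (1 : Int) = ((1 : Nat) : Int) by norm_num, pv_total_eq, pv_foldl_prodN, Nat.cast_one,
    PySem.List.pyRange_zero_nat, PySem.List.foldl_append_singleton_eq_map, List.nil_append,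
    List.map_map]
  apply List.map_congr_left
  intro k _
  simpa using pv_fold_dec G "" k

-- ===== VERDICT (by name: the statement is the Claim_ definition above) =====
theorem get_strings_from_directions_spec : Claim_equal_get_strings_from_directions := by
  intro directions _
  unfold Spec_get_strings_from_directions get_strings_from_directions
  rw [pv_main_lemma, pv_alt_eq_dec, ← pv_prodList_eq_dec]
  simp
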